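-- pv_equiv track=rewrite | github.com/OpenStoryArc/OpenStory | scripts/analyze_turn_shapes.py | segment_turns
-- ===== SOURCE A (Python) =====
-- RELEVANT_TYPES = {
--     "user_message", "assistant_message", "tool_call", "tool_result",
--     "reasoning", "system_event", "turn_end",
-- }
--
-- def segment_turns(records):
--     """Segment records into turns bounded by turn_end."""
--     relevant = [r for r in records if r.get("record_type") in RELEVANT_TYPES]
--     turns = []
--     current = []
--     for r in relevant:
--         rt = r.get("record_type")
--         current.append(r)
--         if rt == "turn_end":
--             turns.append(current)
--             current = []
--     return turns, current  # complete turns + incomplete remainder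
-- ===== SOURCE B (Python) =====
-- RELEVANT_TYPES = {
--     "user_message", "assistant_message", "tool_call", "tool_result",
--     "reasoning", "system_event", "turn_end",
-- }
--
-- def segment_turns(records):
--     """Segment records into turns bounded by turn_end (boundary-index decomposition)."""
--     relevant = [r for r in records if r.get("record_type") in RELEVANT_TYPES]
--     ends = [i for i, r in enumerate(relevant) if r.get("record_type") == "turn_end"]
--     starts = [0] + [i + 1 for i in ends]
--     turns = [relevant[s:e + 1] for s, e in zip(starts, ends)]
--     return turns, relevant[(ends[-1] + 1) if ends else 0:]
-- ===== Notes on version B (the rewrite author's own statement) =====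
-- stated objective: alternative
-- what changed: A builds turns with a running 'current' accumulator emptied at each turn_end; B instead collects the boundary indices of the turn_end records and reconstructs each turn (and the remainder) by slicing the filtered list between consecutive boundaries.
import Mathlib
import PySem

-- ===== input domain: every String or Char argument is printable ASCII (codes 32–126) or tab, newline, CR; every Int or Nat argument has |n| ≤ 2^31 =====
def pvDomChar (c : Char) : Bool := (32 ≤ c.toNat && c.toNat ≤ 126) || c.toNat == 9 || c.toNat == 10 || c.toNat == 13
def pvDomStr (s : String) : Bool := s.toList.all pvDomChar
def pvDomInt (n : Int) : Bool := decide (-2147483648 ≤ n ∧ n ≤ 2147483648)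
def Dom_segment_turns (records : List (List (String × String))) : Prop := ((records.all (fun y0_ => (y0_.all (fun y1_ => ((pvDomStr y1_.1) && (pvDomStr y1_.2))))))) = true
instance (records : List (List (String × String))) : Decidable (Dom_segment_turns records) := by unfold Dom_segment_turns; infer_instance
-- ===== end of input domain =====

-- B replaces A's running-accumulator loop by a boundary-index decomposition: it collects the
-- indices of the 'turn_end' records and builds the turns by slicing between consecutive
-- boundaries (objective: alternative decomposition, same cost).


-- shared module context: RELEVANT_TYPES and dict lookup r.get("record_type")
def pvRelevantTypes : List String :=
  ["user_message", "assistant_message", "tool_call", "tool_result",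
   "reasoning", "system_event", "turn_end"]

-- r.get("record_type"): first-match association-list lookup, none = missing key
def pvGetRT (r : List (String × String)) : Option String :=
  (r.find? (fun p => p.1 == "record_type")).map (·.2)

-- r.get("record_type") in RELEVANT_TYPES (None is never in the set)
def pvIsRelevant (r : List (String × String)) : Bool :=
  match pvGetRT r with
  | some s => pvRelevantTypes.contains s
  | none => false

-- ===== PORT A =====
def segment_turns (records : List (List (String × String))) :
    (List (List (List (String × String)))) × (List (List (String × String))) :=
  let relevant := records.filter pvIsRelevant
  -- turns = []; current = []; for r in relevant: …  — fold with state (turns, current)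
  relevant.foldl
    (fun (st : (List (List (List (String × String)))) × (List (List (String × String)))) r =>
      let rt := pvGetRT r
      let current := st.2 ++ [r]
      if rt == some "turn_end" then (st.1 ++ [current], []) else (st.1, current))
    ([], [])

-- ===== PORT B =====
def segment_turns_alt (records : List (List (String × String))) :
    (List (List (List (String × String)))) × (List (List (String × String))) :=
  let relevant := records.filter pvIsRelevant
  -- ends = [i for i, r in enumerate(relevant) if r.get("record_type") == "turn_end"]
  let ends : List Int :=
    ((PySem.List.enumerate relevant 0).filter (fun p => pvGetRT p.2 == some "turn_end")).map (·.1)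
  -- starts = [0] + [i + 1 for i in ends]
  let starts : List Int := 0 :: ends.map (· + 1)
  -- turns = [relevant[s:e + 1] for s, e in zip(starts, ends)]
  let turns := (starts.zip ends).map
    (fun se => PySem.List.slice relevant (some se.1) (some (se.2 + 1)))
  -- relevant[(ends[-1] + 1) if ends else 0:]
  let st : Int := match ends.getLast? with | some e => e + 1 | none => 0
  (turns, PySem.List.slice relevant (some st) none)

-- ===== PRECONDITION & SPEC =====
def Spec_segment_turns (records : List (List (String × String))) (out : (List (List (List (String × String)))) × (List (List (String × String)))) : Prop := out = segment_turns_alt records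
instance (records : List (List (String × String))) (out : (List (List (List (String × String)))) × (List (List (String × String)))) : Decidable (Spec_segment_turns records out) := by unfold Spec_segment_turns; infer_instance

-- ===== CLAIM (what is proved, stated in full; the proofs are below) =====
def Claim_equal_segment_turns : Prop := ∀ (records : List (List (String × String))), Dom_segment_turns records → Spec_segment_turns records (segment_turns records)

-- ===== LEMMAS AND PROOFS =====

-- is r a turn_end record?
def pvIsEnd (r : List (String × String)) : Bool := pvGetRT r == some "turn_end"

-- common reference shape: structural recursion from the right
def pvSpecSeg : List (List (String × String)) →
    (List (List (List (String × String)))) × (List (List (String × String)))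
  | [] => ([], [])
  | r :: rs =>
    let p := pvSpecSeg rs
    if pvIsEnd r then ([r] :: p.1, p.2)
    else
      match p.1 with
      | [] => ([], r :: p.2)
      | t :: ts => ((r :: t) :: ts, p.2)

-- prepend a pending prefix onto the first turn (or the remainder)
def pvPrep (cur : List (List (String × String)))
    (p : (List (List (List (String × String)))) × (List (List (String × String)))) :
    (List (List (List (String × String)))) × (List (List (String × String))) :=
  match p.1 with
  | [] => ([], cur ++ p.2)
  | t :: ts => ((cur ++ t) :: ts, p.2)

lemma pvPrep_nil (p : (List (List (List (String × String)))) × (List (List (String × String)))) :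
    pvPrep [] p = p := by
  rcases p with ⟨ts, rem⟩; cases ts <;> simp [pvPrep]

lemma segA_fold (rel : List (List (String × String)))
    (ts : List (List (List (String × String)))) (cur : List (List (String × String))) :
    rel.foldl
      (fun (st : (List (List (List (String × String)))) × (List (List (String × String)))) r =>
        let rt := pvGetRT r
        let current := st.2 ++ [r]
        if rt == some "turn_end" then (st.1 ++ [current], []) else (st.1, current))
      (ts, cur)
    = (ts ++ (pvPrep cur (pvSpecSeg rel)).1, (pvPrep cur (pvSpecSeg rel)).2) := by
  induction rel generalizing ts cur with
  | nil => simp [pvSpecSeg, pvPrep]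
  | cons r rs ih =>
    by_cases h : pvIsEnd r = true
    · have h' : (pvGetRT r == some "turn_end") = true := h
      simp only [List.foldl_cons, h', ih]
      rcases hp : (pvSpecSeg rs).1 with _ | ⟨t, tl⟩ <;>
        simp [pvSpecSeg, h, pvPrep, hp]
    · have h' : (pvGetRT r == some "turn_end") = false := by
        simpa [pvIsEnd] using h
      simp only [List.foldl_cons, h', Bool.false_eq_true, if_false, ih]
      rcases hp : (pvSpecSeg rs).1 with _ | ⟨t, tl⟩ <;>
        simp [pvSpecSeg, h, pvPrep, hp]

lemma segA_eq_spec (rel : List (List (String × String))) :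
    (rel.foldl
      (fun (st : (List (List (List (String × String)))) × (List (List (String × String)))) r =>
        let rt := pvGetRT r
        let current := st.2 ++ [r]
        if rt == some "turn_end" then (st.1 ++ [current], []) else (st.1, current))
      ([], []))
    = pvSpecSeg rel := by
  rw [segA_fold, pvPrep_nil]; simp

-- indices of the turn_end records, enumerated from s
def pvEndsFrom (xs : List (List (String × String))) (s : Int) : List Int :=
  ((PySem.List.enumerate xs s).filter (fun p => pvGetRT p.2 == some "turn_end")).map (·.1)

lemma pvEndsFrom_cons (x : List (String × String)) (xs : List (List (String × String))) (s : Int) :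
    pvEndsFrom (x :: xs) s
      = (if pvIsEnd x then [s] else []) ++ pvEndsFrom xs (s + 1) := by
  by_cases h : pvIsEnd x = true <;>
    simp [pvEndsFrom, PySem.List.enumerate_cons, List.filter_cons, pvIsEnd] at h ⊢ <;>
    simp [h]

lemma pvEndsFrom_shift (xs : List (List (String × String))) (s : Int) :
    pvEndsFrom xs (s + 1) = (pvEndsFrom xs s).map (· + 1) := by
  induction xs generalizing s with
  | nil => simp [pvEndsFrom]
  | cons x xs ih =>
    rw [pvEndsFrom_cons, pvEndsFrom_cons, ih (s + 1)]
    by_cases h : pvIsEnd x = true <;> simp [h]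

lemma pvEndsFrom_nonneg (xs : List (List (String × String))) (s : Int) (i : Int)
    (hi : i ∈ pvEndsFrom xs s) : s ≤ i := by
  simp only [pvEndsFrom, List.mem_map, List.mem_filter] at hi
  obtain ⟨p, ⟨hmem, -⟩, rfl⟩ := hi
  obtain ⟨k, hk, rfl⟩ := (PySem.List.mem_enumerate_iff xs s p).mp hmem
  simp

lemma slice_cons_shift (r : List (String × String)) (rs : List (List (String × String)))
    (s e : Int) (hs : 0 ≤ s) (he : 0 ≤ e) :
    PySem.List.slice (r :: rs) (some (s + 1)) (some (e + 1))
      = PySem.List.slice rs (some s) (some e) := by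
  rw [PySem.List.slice_toNat (r :: rs) (by omega) (by omega),
      PySem.List.slice_toNat rs hs he]
  have h1 : (s + 1).toNat = s.toNat + 1 := by omega
  have h2 : (e + 1).toNat - (s + 1).toNat = e.toNat - s.toNat := by omega
  rw [h2, h1, List.drop_succ_cons]

-- shifting every zip component by one strips a leading cons from the sliced list
lemma turns_shift (r : List (String × String)) (rs : List (List (String × String)))
    (S E : List Int) (hS : ∀ s ∈ S, 0 ≤ s) (hE : ∀ e ∈ E, 0 ≤ e) :
    ((S.map (· + 1)).zip (E.map (· + 1))).map
        (fun se => PySem.List.slice (r :: rs) (some se.1) (some (se.2 + 1)))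
      = (S.zip E).map (fun se => PySem.List.slice rs (some se.1) (some (se.2 + 1))) := by
  rw [List.zip_map, List.map_map]
  refine List.map_congr_left ?_
  intro se hse
  obtain ⟨hs, he⟩ := List.of_mem_zip hse
  have := hS se.1 hs
  have := hE se.2 he
  simp only [Function.comp, Prod.map]
  exact slice_cons_shift r rs se.1 (se.2 + 1) (by omega) (by omega)

-- B's core computation, named so the induction can speak about it
def pvSegB (relevant : List (List (String × String))) :
    (List (List (List (String × String)))) × (List (List (String × String))) :=
  let ends := pvEndsFrom relevant 0
  let starts : List Int := 0 :: ends.map (· + 1)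
  let turns := (starts.zip ends).map
    (fun se => PySem.List.slice relevant (some se.1) (some (se.2 + 1)))
  let st : Int := match ends.getLast? with | some e => e + 1 | none => 0
  (turns, PySem.List.slice relevant (some st) none)

lemma slice_cons_head (r : List (String × String)) (rs : List (List (String × String)))
    (b : Int) (hb : 0 ≤ b) :
    PySem.List.slice (r :: rs) (some 0) (some (b + 1))
      = r :: PySem.List.slice rs (some 0) (some b) := by
  rw [PySem.List.slice_toNat (r :: rs) (by omega) (by omega),
      PySem.List.slice_toNat rs (by omega) hb]
  have h1 : (b + 1).toNat = b.toNat + 1 := by omega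
  simp [h1]

lemma slice_from_cons (r : List (String × String)) (rs : List (List (String × String)))
    (a : Int) (ha : 0 ≤ a) :
    PySem.List.slice (r :: rs) (some (a + 1)) none = PySem.List.slice rs (some a) none := by
  rw [PySem.List.slice_from (r :: rs) (by omega), PySem.List.slice_from rs ha]
  have h1 : (a + 1).toNat = a.toNat + 1 := by omega
  rw [h1, List.drop_succ_cons]

lemma rem_shift_end (r : List (String × String)) (rs : List (List (String × String)))
    (E : List Int) (hE : ∀ e ∈ E, 0 ≤ e) :
    PySem.List.slice (r :: rs)
        (some (match ((0 : Int) :: E.map (· + 1)).getLast? with | some e => e + 1 | none => 0)) none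
      = PySem.List.slice rs
        (some (match E.getLast? with | some e => e + 1 | none => 0)) none := by
  rw [List.getLast?_cons, List.getLast?_map]
  rcases hL : E.getLast? with _ | eL
  · show PySem.List.slice (r :: rs) (some ((0 : Int) + 1)) none
      = PySem.List.slice rs (some 0) none
    exact slice_from_cons r rs 0 le_rfl
  · have heL : 0 ≤ eL := hE eL (List.mem_of_getLast? hL)
    show PySem.List.slice (r :: rs) (some (eL + 1 + 1)) none
      = PySem.List.slice rs (some (eL + 1)) none
    exact slice_from_cons r rs (eL + 1) (by omega)

lemma rem_shift_map (r : List (String × String)) (rs : List (List (String × String)))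
    (E : List Int) (hE : ∀ e ∈ E, 0 ≤ e) (hne : E ≠ []) :
    PySem.List.slice (r :: rs)
        (some (match (E.map (· + 1)).getLast? with | some e => e + 1 | none => 0)) none
      = PySem.List.slice rs
        (some (match E.getLast? with | some e => e + 1 | none => 0)) none := by
  rcases hL : E.getLast? with _ | eL
  · exact absurd (List.getLast?_eq_none_iff.mp hL) hne
  · have heL : 0 ≤ eL := hE eL (List.mem_of_getLast? hL)
    rw [List.getLast?_map, hL]
    show PySem.List.slice (r :: rs) (some (eL + 1 + 1)) none
      = PySem.List.slice rs (some (eL + 1)) none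
    exact slice_from_cons r rs (eL + 1) (by omega)

lemma segB_eq_spec (rel : List (List (String × String))) : pvSegB rel = pvSpecSeg rel := by
  induction rel with
  | nil => simp [pvSegB, pvSpecSeg, pvEndsFrom, PySem.List.slice_from]
  | cons r rs ih =>
    have hE0 : ∀ e ∈ pvEndsFrom rs 0, 0 ≤ e := fun e he => pvEndsFrom_nonneg rs 0 e he
    have hS0 : ∀ s ∈ (0 : Int) :: (pvEndsFrom rs 0).map (· + 1), 0 ≤ s := by
      intro s hs
      rcases List.mem_cons.mp hs with rfl | hs
      · exact le_refl 0
      · obtain ⟨e, he, rfl⟩ := List.mem_map.mp hs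
        have := hE0 e he; omega
    have hBrs : pvSegB rs
        = ((((0 : Int) :: (pvEndsFrom rs 0).map (· + 1)).zip (pvEndsFrom rs 0)).map
             (fun se => PySem.List.slice rs (some se.1) (some (se.2 + 1))),
           PySem.List.slice rs
             (some (match (pvEndsFrom rs 0).getLast? with | some e => e + 1 | none => 0))
             none) := rfl
    have hspecrs := ih.symm.trans hBrs
    by_cases h : pvIsEnd r = true
    · -- r ends a turn: the new first turn is [r], everything else shifts by one
      have hcons : pvEndsFrom (r :: rs) 0 = (0 : Int) :: (pvEndsFrom rs 0).map (· + 1) := by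
        rw [pvEndsFrom_cons, pvEndsFrom_shift rs 0, if_pos h, List.singleton_append]
      rw [pvSegB, hcons]
      have hzip : (((0 : Int) :: ((0 : Int) :: (pvEndsFrom rs 0).map (· + 1)).map (· + 1)).zip
            ((0 : Int) :: (pvEndsFrom rs 0).map (· + 1)))
          = ((0 : Int), (0 : Int)) ::
            ((((0 : Int) :: (pvEndsFrom rs 0).map (· + 1)).map (· + 1)).zip
              ((pvEndsFrom rs 0).map (· + 1))) := by
        simp
      rw [hzip, List.map_cons, turns_shift r rs _ _ hS0 hE0]
      have hhead : PySem.List.slice (r :: rs) (some (0 : Int)) (some ((0 : Int) + 1)) = [r] := by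
        rw [PySem.List.slice_toNat (r :: rs) (by omega) (by omega)]; rfl
      rw [hhead, rem_shift_end r rs _ hE0]
      have hspec : pvSpecSeg (r :: rs) = ([r] :: (pvSpecSeg rs).1, (pvSpecSeg rs).2) := by
        simp [pvSpecSeg, h]
      rw [hspec, hspecrs]
    · -- r is not a turn_end: it is prepended to the first turn (or to the remainder)
      have hcons : pvEndsFrom (r :: rs) 0 = (pvEndsFrom rs 0).map (· + 1) := by
        rw [pvEndsFrom_cons, pvEndsFrom_shift rs 0, if_neg h, List.nil_append]
      rw [pvSegB, hcons]
      have hspec : pvSpecSeg (r :: rs)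
          = (match (pvSpecSeg rs).1 with
             | [] => ([], r :: (pvSpecSeg rs).2)
             | t :: ts => ((r :: t) :: ts, (pvSpecSeg rs).2)) := by
        simp only [pvSpecSeg, h, Bool.false_eq_true, if_false]
      rcases hE : pvEndsFrom rs 0 with _ | ⟨e0, E'⟩
      · -- no turn_end anywhere: everything is the remainder
        rw [hE] at hspecrs
        simp only [List.zip_nil_right, List.map_nil] at hspecrs
        rw [hspec, hspecrs]
        simp [PySem.List.slice_from]
      · have he0 : 0 ≤ e0 := hE0 e0 (by rw [hE]; exact List.mem_cons_self ..)
        have hE'0 : ∀ e ∈ E', 0 ≤ e := fun e he => hE0 e (by rw [hE]; exact List.mem_cons_of_mem _ he)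
        have hS'0 : ∀ s ∈ (e0 + 1) :: E'.map (· + 1), 0 ≤ s := by
          intro s hs
          rcases List.mem_cons.mp hs with rfl | hs
          · omega
          · obtain ⟨e, he, rfl⟩ := List.mem_map.mp hs
            have := hE'0 e he; omega
        -- reduce the rs-side pair to explicit cons form
        rw [hE] at hspecrs
        simp only [List.map_cons, List.zip_cons_cons] at hspecrs
        have hzip : (((0 : Int) :: ((e0 :: E').map (· + 1)).map (· + 1)).zip
              ((e0 :: E').map (· + 1)))
            = ((0 : Int), e0 + 1) ::
              ((((e0 + 1) :: E'.map (· + 1)).map (· + 1)).zip (E'.map (· + 1))) := by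
          simp
        rw [hzip, List.map_cons, turns_shift r rs _ _ hS'0 hE'0,
            slice_cons_head r rs (e0 + 1) (by omega),
            rem_shift_map r rs (e0 :: E') (hE ▸ hE0) (by simp)]
        rw [hspec, hspecrs]

-- ===== VERDICT (by name: the statement is the Claim_ definition above) =====
theorem segment_turns_spec : Claim_equal_segment_turns := by
  intro records _
  show segment_turns records = segment_turns_alt records
  have hB : segment_turns_alt records = pvSegB (records.filter pvIsRelevant) := by
    simp [segment_turns_alt, pvSegB, pvEndsFrom]
  rw [hB, segB_eq_spec]
  exact segA_eq_spec (records.filter pvIsRelevant)
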